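-- pv_equiv track=rewrite | github.com/angelotoledo-gif/python-learning | Week_2/Week2_Lab2.py | recommend_courses
-- ===== SOURCE A (Python) =====
-- def recommend_courses(student, student_schedules):
--     """
--     Recommend courses based on what similar students take.
--     Args:
--     student: Student name
--     student_schedules: Dictionary of student course sets
--     Returns:
--     Set of recommended courses (not currently taken)
--     """
--     # TODO: Find students with overlapping courses
--     # TODO: Recommend their courses that this student doesn't take
--     current_courses = student_schedules.get(student, set())
--     recommended_courses = set()
--     for other_student, courses in student_schedules.items():
--         if other_student != student and current_courses.intersection(courses):
--             # Add courses taken by similar students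
--             recommended_courses.update(courses)
--     recommended_courses.difference_update(current_courses)
--     return recommended_courses
-- ===== SOURCE B (Python) =====
-- def recommend_courses(student, student_schedules):
--     """Inverted-index re-implementation: course -> students index, then union
--     the schedules of students similar to `student` and subtract the current courses."""
--     current_courses = student_schedules.get(student, set())
--     # Build an inverted index: course -> set of students taking it.
--     index = {}
--     for other_student, courses in student_schedules.items():
--         for course in courses:
--             index.setdefault(course, set()).add(other_student)
--     # Students sharing at least one course with `student` (self included; harmless,
--     # since the final subtraction removes all of the student's own courses).
--     similar_students = set()
--     for course in current_courses:
--         similar_students |= index.get(course, set())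
--     # Union the full schedules of the similar students, drop the current courses.
--     recommended_courses = set()
--     for other_student, courses in student_schedules.items():
--         if other_student in similar_students:
--             recommended_courses |= courses
--     return recommended_courses - current_courses
-- ===== Notes on version B (the rewrite author's own statement) =====
-- stated objective: alternative
-- what changed: B first builds an inverted index (course -> set of students) in one pass, derives the set of similar students by unioning the index entries of the target's courses, then unions those students' schedules and subtracts the current courses, replacing A's per-student intersection test.
import Mathlib
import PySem

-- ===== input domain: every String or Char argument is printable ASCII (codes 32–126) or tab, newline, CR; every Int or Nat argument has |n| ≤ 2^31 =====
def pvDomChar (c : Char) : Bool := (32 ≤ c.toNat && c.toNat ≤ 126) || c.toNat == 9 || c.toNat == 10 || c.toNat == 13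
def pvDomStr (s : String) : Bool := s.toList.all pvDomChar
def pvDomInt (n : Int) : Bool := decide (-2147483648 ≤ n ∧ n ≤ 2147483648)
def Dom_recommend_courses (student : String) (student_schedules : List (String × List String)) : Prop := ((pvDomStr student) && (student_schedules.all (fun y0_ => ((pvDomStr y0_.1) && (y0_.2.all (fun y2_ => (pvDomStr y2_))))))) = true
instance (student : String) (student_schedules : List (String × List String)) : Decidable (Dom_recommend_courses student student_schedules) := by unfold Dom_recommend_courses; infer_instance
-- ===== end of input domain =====

-- B replaces A's per-student intersection scan by an inverted index (course -> students), then unions similar students' schedules; alternative decomposition, same exact result.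


-- ===== PORT A =====
-- Port of A: one pass over the schedule dict, collecting the schedules of every
-- other student whose courses intersect the target's, then removing the target's courses.
def recommend_courses (student : String) (student_schedules : List (String × List String)) : List String :=
  let d := PySem.Dict.ofList student_schedules
  let current_courses := d.getD student PySem.Set.empty
  let recommended_courses := d.items.foldl
    (fun acc p =>
      if p.1 ≠ student ∧ PySem.Set.inter current_courses p.2 ≠ [] then
        PySem.Set.update acc p.2
      else acc)
    PySem.Set.empty
  PySem.Set.diff recommended_courses current_courses

-- ===== PORT B =====
-- Port of B (Source B): build an inverted index course -> set of students, union the index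
-- entries of the target's courses into `similar`, union similar students' schedules, subtract.
def recommend_courses_alt (student : String) (student_schedules : List (String × List String)) : List String :=
  let d := PySem.Dict.ofList student_schedules
  let current_courses := d.getD student PySem.Set.empty
  -- index.setdefault(course, set()).add(other_student)  =  modify course ∅ (add · other_student)
  let index := d.items.foldl
    (fun idx p => p.2.foldl
      (fun idx c => idx.modify c PySem.Set.empty (fun v => PySem.Set.add v p.1)) idx)
    PySem.Dict.empty
  let similar_students := current_courses.foldl
    (fun acc c => PySem.Set.union acc (index.getD c PySem.Set.empty)) PySem.Set.empty
  let recommended_courses := d.items.foldl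
    (fun acc p =>
      if PySem.Set.contains similar_students p.1 then PySem.Set.update acc p.2 else acc)
    PySem.Set.empty
  PySem.Set.diff recommended_courses current_courses

-- ===== PRECONDITION & SPEC =====
def Spec_recommend_courses (student : String) (student_schedules : List (String × List String)) (out : List String) : Prop := out = recommend_courses_alt student student_schedules
instance (student : String) (student_schedules : List (String × List String)) (out : List String) : Decidable (Spec_recommend_courses student student_schedules out) := by unfold Spec_recommend_courses; infer_instance

-- ===== CLAIM (what is proved, stated in full; the proofs are below) =====
def Claim_equal_recommend_courses : Prop := ∀ (student : String) (student_schedules : List (String × List String)), Dom_recommend_courses student student_schedules → Spec_recommend_courses student student_schedules (recommend_courses student student_schedules)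

-- ===== LEMMAS AND PROOFS =====

lemma mem_index_inner (cs : List String) (idx : PySem.Dict String (List String))
    (s x c : String) :
    x ∈ (cs.foldl (fun idx c => idx.modify c PySem.Set.empty (fun v => PySem.Set.add v s)) idx).getD c PySem.Set.empty
      ↔ x ∈ idx.getD c PySem.Set.empty ∨ (x = s ∧ c ∈ cs) := by
  induction cs generalizing idx with
  | nil => simp
  | cons c' cs ih =>
    simp only [List.foldl_cons, ih]
    by_cases hc : c = c'
    · subst hc
      rw [PySem.Dict.getD_modify_self]
      simp [PySem.Set.mem_add]
      tauto
    · rw [PySem.Dict.getD_modify_of_ne _ _ _ hc]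
      simp [hc]

lemma mem_index (l : List (String × List String)) (idx : PySem.Dict String (List String))
    (x c : String) :
    x ∈ (l.foldl (fun idx p => p.2.foldl
          (fun idx c => idx.modify c PySem.Set.empty (fun v => PySem.Set.add v p.1)) idx) idx).getD c PySem.Set.empty
      ↔ x ∈ idx.getD c PySem.Set.empty ∨ ∃ p ∈ l, x = p.1 ∧ c ∈ p.2 := by
  induction l generalizing idx with
  | nil => simp
  | cons p l ih =>
    simp only [List.foldl_cons, ih, mem_index_inner]
    simp
    tauto
lemma mem_similar (index : PySem.Dict String (List String)) (cl acc : List String) (x : String) :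
    x ∈ cl.foldl (fun acc c => PySem.Set.union acc (index.getD c PySem.Set.empty)) acc
      ↔ x ∈ acc ∨ ∃ c ∈ cl, x ∈ index.getD c PySem.Set.empty := by
  induction cl generalizing acc with
  | nil => simp
  | cons c cl ih =>
    rw [List.foldl_cons, ih]
    simp only [PySem.Set.union, PySem.Set.mem_update, List.mem_cons]
    constructor
    · rintro ((h | h) | ⟨a, ha, h⟩)
      · tauto
      · exact Or.inr ⟨c, Or.inl rfl, h⟩
      · exact Or.inr ⟨a, Or.inr ha, h⟩
    · rintro (h | ⟨a, (rfl | ha), h⟩)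
      · tauto
      · tauto
      · exact Or.inr ⟨a, ha, h⟩

lemma filter_add_congr (cur a b : List String) (c : String)
    (h : a.filter (fun x => !cur.contains x) = b.filter (fun x => !cur.contains x)) :
    (PySem.Set.add a c).filter (fun x => !cur.contains x)
      = (PySem.Set.add b c).filter (fun x => !cur.contains x) := by
  by_cases hc : c ∈ cur
  · have key : ∀ s : List String, (PySem.Set.add s c).filter (fun x => !cur.contains x)
        = s.filter (fun x => !cur.contains x) := by
      intro s
      rw [PySem.Set.add_eq_ite]
      split_ifs with hs
      · rfl
      · simp [List.filter_append, hc]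
    rw [key, key, h]
  · have hca : c ∈ a ↔ c ∈ b := by
      constructor <;> intro hm
      · have : c ∈ a.filter (fun x => !cur.contains x) := by
          simp [List.mem_filter, hm, hc]
        rw [h] at this; exact (List.mem_filter.mp this).1
      · have : c ∈ b.filter (fun x => !cur.contains x) := by
          simp [List.mem_filter, hm, hc]
        rw [← h] at this; exact (List.mem_filter.mp this).1
    rw [PySem.Set.add_eq_ite, PySem.Set.add_eq_ite]
    by_cases hm : c ∈ a
    · rw [if_pos hm, if_pos (hca.mp hm), h]
    · rw [if_neg hm, if_neg (fun hb => hm (hca.mpr hb)),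
        List.filter_append, List.filter_append, h]
lemma filter_update_congr (cur : List String) (cs a b : List String)
    (h : a.filter (fun x => !cur.contains x) = b.filter (fun x => !cur.contains x)) :
    (PySem.Set.update a cs).filter (fun x => !cur.contains x)
      = (PySem.Set.update b cs).filter (fun x => !cur.contains x) := by
  induction cs generalizing a b with
  | nil => exact h
  | cons c cs ih =>
    simp only [PySem.Set.update, List.foldl_cons] at *
    exact ih _ _ (filter_add_congr cur a b c h)
lemma filter_update_sub (cur : List String) (cs a : List String)
    (hcs : ∀ c ∈ cs, c ∈ cur) :
    (PySem.Set.update a cs).filter (fun x => !cur.contains x)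
      = a.filter (fun x => !cur.contains x) := by
  induction cs generalizing a with
  | nil => rfl
  | cons c cs ih =>
    simp only [PySem.Set.update, List.foldl_cons] at *
    rw [ih _ (fun c hc => hcs c (List.mem_cons_of_mem _ hc))]
    rw [PySem.Set.add_eq_ite]
    split_ifs with hs
    · rfl
    · simp [List.filter_append, hcs c (List.mem_cons_self ..)]

lemma fold_filter_congr (student : String) (cur similar : List String)
    (l : List (String × List String))
    (hcond : ∀ p ∈ l, p.1 ≠ student → (PySem.Set.contains similar p.1 = true ↔ ∃ c ∈ cur, c ∈ p.2))
    (hself : ∀ p ∈ l, p.1 = student → ∀ c ∈ p.2, c ∈ cur) :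
    ∀ a b, a.filter (fun x => !cur.contains x) = b.filter (fun x => !cur.contains x) →
      (l.foldl (fun acc p =>
          if p.1 ≠ student ∧ PySem.Set.inter cur p.2 ≠ [] then PySem.Set.update acc p.2 else acc) a).filter
            (fun x => !cur.contains x)
        = (l.foldl (fun acc p =>
          if PySem.Set.contains similar p.1 then PySem.Set.update acc p.2 else acc) b).filter
            (fun x => !cur.contains x) := by
  induction l with
  | nil => intro a b h; exact h
  | cons p l ih =>
    intro a b h
    simp only [List.foldl_cons]
    apply ih
    · intro q hq hqs; exact hcond q (List.mem_cons_of_mem _ hq) hqs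
    · intro q hq hqs; exact hself q (List.mem_cons_of_mem _ hq) hqs
    by_cases hs : p.1 = student
    · rw [if_neg (by simp [hs])]
      by_cases hb : PySem.Set.contains similar p.1 = true
      · rw [if_pos hb, filter_update_sub cur p.2 b (hself p (List.mem_cons_self ..) hs), h]
      · rw [if_neg hb, h]
    · have hiff : (p.1 ≠ student ∧ PySem.Set.inter cur p.2 ≠ []) ↔ PySem.Set.contains similar p.1 = true := by
        rw [hcond p (List.mem_cons_self ..) hs]
        constructor
        · rintro ⟨-, hne⟩
          rcases List.exists_mem_of_ne_nil _ hne with ⟨c, hc⟩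
          simp only [PySem.Set.inter, List.mem_filter, PySem.Set.contains_iff] at hc
          exact ⟨c, hc.1, hc.2⟩
        · rintro ⟨c, hc1, hc2⟩
          refine ⟨hs, ?_⟩
          simp only [PySem.Set.inter, ne_eq, List.filter_eq_nil_iff]
          push Not
          exact ⟨c, hc1, by simpa [PySem.Set.contains_iff] using hc2⟩
      by_cases hb : PySem.Set.contains similar p.1 = true
      · rw [if_pos (hiff.mpr hb), if_pos hb]
        exact filter_update_congr cur p.2 a b h
      · rw [if_neg (fun hA => hb (hiff.mp hA)), if_neg hb, h]

-- ===== VERDICT (by name: the statement is the Claim_ definition above) =====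
theorem recommend_courses_spec : Claim_equal_recommend_courses := by
  intro student student_schedules _
  unfold Spec_recommend_courses
  unfold recommend_courses recommend_courses_alt
  set d := PySem.Dict.ofList student_schedules with hd
  set cur := d.getD student PySem.Set.empty with hcur
  set index := d.items.foldl
    (fun idx p => p.2.foldl
      (fun idx c => idx.modify c PySem.Set.empty (fun v => PySem.Set.add v p.1)) idx)
    PySem.Dict.empty with hindex
  set similar := cur.foldl
    (fun acc c => PySem.Set.union acc (index.getD c PySem.Set.empty)) PySem.Set.empty with hsim
  have hnd : d.keys.Nodup := PySem.Dict.nodup_keys_ofList student_schedules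
  have hval : ∀ p ∈ d.items, ∀ q ∈ d.items, q.1 = p.1 → q.2 = p.2 := by
    intro p hp q hq hqp
    have h1 : d.get? p.1 = some p.2 :=
      PySem.Dict.get?_of_mem_items d (by simpa using hp) hnd
    have h2 : d.get? p.1 = some q.2 := by
      rw [← hqp]
      exact PySem.Dict.get?_of_mem_items d (by simpa using hq) hnd
    have := h1.symm.trans h2
    simpa using this.symm
  have hmemsim : ∀ x : String, x ∈ similar ↔ ∃ c ∈ cur, ∃ q ∈ d.items, x = q.1 ∧ c ∈ q.2 := by
    intro x
    rw [hsim, mem_similar]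
    constructor
    · rintro (hx | ⟨c, hc, hx⟩)
      · exact absurd hx (by simp [PySem.Set.empty])
      · rw [hindex, mem_index] at hx
        rcases hx with hx | hx
        · rw [PySem.Dict.getD_empty] at hx
          exact absurd hx (by simp [PySem.Set.empty])
        · exact ⟨c, hc, hx⟩
    · rintro ⟨c, hc, hq⟩
      exact Or.inr ⟨c, hc, by rw [hindex, mem_index]; exact Or.inr hq⟩
  show PySem.Set.diff _ cur = PySem.Set.diff _ cur
  simp only [PySem.Set.diff]
  apply fold_filter_congr student cur similar d.items
  · intro p hp hps
    rw [PySem.Set.contains_iff, hmemsim]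
    constructor
    · rintro ⟨c, hc, q, hq, hpq, hcq⟩
      exact ⟨c, hc, by rw [hval p hp q hq hpq.symm] at hcq; exact hcq⟩
    · rintro ⟨c, hc, hcp⟩
      exact ⟨c, hc, p, hp, rfl, hcp⟩
  · intro p hp hps c hc
    have h1 : d.get? student = some p.2 := by
      rw [← hps]
      exact PySem.Dict.get?_of_mem_items d (by simpa using hp) hnd
    rw [hcur, PySem.Dict.getD, h1]
    exact hc
  · rfl
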